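-- pv_equiv track=rewrite | github.com/federicoogallo/Hackathon-MI | scripts/review_candidate.py | _find_event_to_remove
-- ===== SOURCE A (Python) =====
-- def _find_event_to_remove(identifier: str, events: list[dict]) -> dict:
--     key = identifier.strip().lower()
--     if not key:
--         raise SystemExit("Identifier cannot be empty")
--
--     # 1) id prefix
--     by_id = [e for e in events if str(e.get("id", "")).startswith(identifier)]
--     if len(by_id) == 1:
--         return by_id[0]
--     if len(by_id) > 1:
--         raise SystemExit(f"Ambiguous id prefix: {identifier}")
--
--     # 2) exact/partial URL
--     by_url = [e for e in events if key in str(e.get("url", "")).lower()]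
--     if len(by_url) == 1:
--         return by_url[0]
--     if len(by_url) > 1:
--         raise SystemExit(f"Ambiguous URL fragment: {identifier}")
--
--     # 3) title fragment
--     by_title = [e for e in events if key in str(e.get("title", "")).lower()]
--     if len(by_title) == 1:
--         return by_title[0]
--     if len(by_title) > 1:
--         raise SystemExit(f"Ambiguous title fragment: {identifier}")
--
--     raise SystemExit(f"No stored event matches: {identifier}")
-- ===== SOURCE B (Python) =====
-- def _find_event_to_remove(identifier: str, events: list[dict]) -> dict:
--     key = identifier.strip().lower()
--     if not key:
--         raise SystemExit("Identifier cannot be empty")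
--
--     # single pass: classify every event into the three match buckets at once
--     by_id, by_url, by_title = [], [], []
--     for e in events:
--         if str(e.get("id", "")).startswith(identifier):
--             by_id.append(e)
--         if key in str(e.get("url", "")).lower():
--             by_url.append(e)
--         if key in str(e.get("title", "")).lower():
--             by_title.append(e)
--
--     for bucket, kind in ((by_id, "id prefix"), (by_url, "URL fragment"), (by_title, "title fragment")):
--         if len(bucket) == 1:
--             return bucket[0]
--         if len(bucket) > 1:
--             raise SystemExit(f"Ambiguous {kind}: {identifier}")
--     raise SystemExit(f"No stored event matches: {identifier}")
-- ===== Notes on version B (the rewrite author's own statement) =====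
-- stated objective: alternative
-- what changed: Three separate filtering passes over events are replaced by one pass that classifies each event into the id/url/title buckets, followed by a uniform precedence loop over the buckets.
import Mathlib
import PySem

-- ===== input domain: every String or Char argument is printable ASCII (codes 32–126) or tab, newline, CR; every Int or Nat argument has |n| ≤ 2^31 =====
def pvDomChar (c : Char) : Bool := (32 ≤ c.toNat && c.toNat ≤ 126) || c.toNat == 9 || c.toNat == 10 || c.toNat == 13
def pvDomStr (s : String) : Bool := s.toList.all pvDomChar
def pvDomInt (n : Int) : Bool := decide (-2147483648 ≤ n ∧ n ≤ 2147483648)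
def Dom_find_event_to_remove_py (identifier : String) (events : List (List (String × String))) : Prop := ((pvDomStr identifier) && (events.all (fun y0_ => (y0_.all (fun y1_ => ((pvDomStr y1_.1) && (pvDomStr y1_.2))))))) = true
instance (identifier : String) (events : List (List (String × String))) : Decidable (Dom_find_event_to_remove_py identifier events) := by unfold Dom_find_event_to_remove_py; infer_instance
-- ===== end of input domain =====

-- B replaces A's three filtering passes over the events by one classifying pass into three buckets; same precedence and messages (alternative decomposition, not faster).


-- e.get(k, "") on the event dict (association list, first match)
def pvGetD (e : List (String × String)) (k : String) : String :=
  PySem.Dict.getD (PySem.Dict.mk e) k ""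

-- the three match predicates (id uses the raw identifier; url/title the lowered key)
def pvIdP (identifier : String) (e : List (String × String)) : Bool :=
  PySem.Str.startswith (pvGetD e "id") identifier
def pvUrlP (key : String) (e : List (String × String)) : Bool :=
  PySem.Str.isIn key (PySem.Str.lower (pvGetD e "url"))
def pvTitleP (key : String) (e : List (String × String)) : Bool :=
  PySem.Str.isIn key (PySem.Str.lower (pvGetD e "title"))

-- ===== PORT A =====  (raise branches return []; they are excluded by Pre_)
def find_event_to_remove_py (identifier : String) (events : List (List (String × String))) : List (String × String) :=
  let key := PySem.Str.lower (PySem.Str.strip identifier)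
  if key = "" then []
  else
    let by_id := events.filter (pvIdP identifier)
    if by_id.length = 1 then by_id.headI
    else if by_id.length > 1 then []
    else
      let by_url := events.filter (pvUrlP key)
      if by_url.length = 1 then by_url.headI
      else if by_url.length > 1 then []
      else
        let by_title := events.filter (pvTitleP key)
        if by_title.length = 1 then by_title.headI
        else []

-- ===== PORT B =====  (single pass classifying each event into three buckets, then the precedence chain)
def find_event_to_remove_py_alt (identifier : String) (events : List (List (String × String))) : List (String × String) :=
  let key := PySem.Str.lower (PySem.Str.strip identifier)
  if key = "" then []
  else
    let buckets := events.foldl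
      (fun (acc : List (List (String × String)) × List (List (String × String)) × List (List (String × String))) e =>
        (if pvIdP identifier e then acc.1 ++ [e] else acc.1,
         if pvUrlP key e then acc.2.1 ++ [e] else acc.2.1,
         if pvTitleP key e then acc.2.2 ++ [e] else acc.2.2))
      ([], [], [])
    if buckets.1.length = 1 then buckets.1.headI
    else if buckets.1.length > 1 then []
    else if buckets.2.1.length = 1 then buckets.2.1.headI
    else if buckets.2.1.length > 1 then []
    else if buckets.2.2.length = 1 then buckets.2.2.headI
    else []

-- ===== PRECONDITION & SPEC =====
-- Pre_ excludes exactly the inputs where Python A raises SystemExit: empty stripped key,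
-- an ambiguous bucket at the deciding tier, or no match at all.
def Pre_find_event_to_remove_py (identifier : String) (events : List (List (String × String))) : Prop :=
  let key := PySem.Str.lower (PySem.Str.strip identifier)
  let nId := events.countP (pvIdP identifier)
  let nUrl := events.countP (pvUrlP key)
  let nTitle := events.countP (pvTitleP key)
  key ≠ "" ∧ (nId = 1 ∨ (nId = 0 ∧ (nUrl = 1 ∨ (nUrl = 0 ∧ nTitle = 1))))
instance (identifier : String) (events : List (List (String × String))) : Decidable (Pre_find_event_to_remove_py identifier events) := by unfold Pre_find_event_to_remove_py; infer_instance

def pvWitness_find_event_to_remove_py : String × (List (List (String × String))) :=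
  ("a", [[("id", "abc"), ("url", ""), ("title", "x")]])

def Spec_find_event_to_remove_py (identifier : String) (events : List (List (String × String))) (out : List (String × String)) : Prop := out = find_event_to_remove_py_alt identifier events
instance (identifier : String) (events : List (List (String × String))) (out : List (String × String)) : Decidable (Spec_find_event_to_remove_py identifier events out) := by unfold Spec_find_event_to_remove_py; infer_instance

-- ===== CLAIM (what is proved, stated in full; the proofs are below) =====
def Claim_equal_find_event_to_remove_py : Prop := ∀ (identifier : String) (events : List (List (String × String))), Dom_find_event_to_remove_py identifier events → Pre_find_event_to_remove_py identifier events → Spec_find_event_to_remove_py identifier events (find_event_to_remove_py identifier events)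

-- ===== LEMMAS AND PROOFS =====

-- B's classifying fold produces exactly the three filtered lists (appended to the accumulator).
theorem pv_fold_buckets (p q r : List (String × String) → Bool)
    (events : List (List (String × String)))
    (a b c : List (List (String × String))) :
    events.foldl
      (fun (acc : List (List (String × String)) × List (List (String × String)) × List (List (String × String))) e =>
        (if p e then acc.1 ++ [e] else acc.1,
         if q e then acc.2.1 ++ [e] else acc.2.1,
         if r e then acc.2.2 ++ [e] else acc.2.2))
      (a, b, c)
    = (a ++ events.filter p, b ++ events.filter q, c ++ events.filter r) := by
  induction events generalizing a b c with
  | nil => simp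
  | cons e es ih =>
    simp only [List.foldl_cons, List.filter_cons]
    rw [ih]
    by_cases hp : p e <;> by_cases hq : q e <;> by_cases hr : r e <;>
      simp [hp, hq, hr]

-- ===== VERDICT (by name: the statement is the Claim_ definition above) =====
theorem find_event_to_remove_py_spec : Claim_equal_find_event_to_remove_py := by
  intro identifier events _ _
  unfold Spec_find_event_to_remove_py find_event_to_remove_py find_event_to_remove_py_alt
  simp only [pv_fold_buckets, List.nil_append]
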